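-- pv_equiv track=rewrite | github.com/ribecks98/NCAA | listParse.py | chopBackwards
-- ===== SOURCE A (Python) =====
-- def chopBackwards(lines,string):
--     i = -1
--     count = len(lines)
--     flag = 0
--     cut = []
--     while i + count >= 0:
--         if string in lines[i]:
--             i = i + count
--             while i < count:
--                 cut.append(lines.pop(i))
--                 count = count - 1
--             return cut
--         else:
--             i = i - 1
--     return cut
-- ===== SOURCE B (Python) =====
-- def chopBackwards(lines, string):
--     # Find-then-slice: one forward pass records the last matching index,
--     # then the suffix is removed in bulk and returned.
--     idx = None
--     for j, line in enumerate(lines):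
--         if string in line:
--             idx = j
--     if idx is None:
--         return []
--     cut = lines[idx:]
--     del lines[idx:]
--     return cut
-- ===== Notes on version B (the rewrite author's own statement) =====
-- stated objective: simpler
-- what changed: Replaces A's backward scan with negative indices plus a nested pop-one-at-a-time removal loop by a single forward pass that records the last matching index followed by one bulk slice/del of the suffix.
import Mathlib
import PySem

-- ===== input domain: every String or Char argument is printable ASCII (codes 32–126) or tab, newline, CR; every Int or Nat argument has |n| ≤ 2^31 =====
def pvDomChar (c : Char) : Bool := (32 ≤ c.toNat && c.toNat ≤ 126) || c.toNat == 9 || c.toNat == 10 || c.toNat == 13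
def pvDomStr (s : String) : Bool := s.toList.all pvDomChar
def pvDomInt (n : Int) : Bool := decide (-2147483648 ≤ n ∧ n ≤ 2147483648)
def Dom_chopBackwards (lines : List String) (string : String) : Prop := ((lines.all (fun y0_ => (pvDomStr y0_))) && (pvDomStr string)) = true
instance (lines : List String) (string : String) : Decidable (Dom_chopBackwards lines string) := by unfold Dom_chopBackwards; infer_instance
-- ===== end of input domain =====

-- B replaces A's backward negative-index scan plus nested pop loop by a forward
-- last-match search followed by one bulk slice (simpler decomposition); both
-- mutate `lines` by removing the returned suffix, the theorems are about the
-- return value.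

-- ===== PORT A =====
-- inner `while i < count: cut.append(lines.pop(i)); count -= 1` loop
def chopA_pop (lines : List String) (i count : Int) (cut : List String) : List String :=
  if h : i < count then
    match PySem.List.pop? lines i with
    | none => cut            -- IndexError; unreachable from chopBackwards
    | some (x, rest) => chopA_pop rest i (count - 1) (cut ++ [x])
  else cut
termination_by (count - i).toNat
decreasing_by omega

-- outer `while i + count >= 0` loop, i stepping -1, -2, …
def chopA_loop (lines : List String) (string : String) (i count : Int) : List String :=
  if h : 0 ≤ i + count then
    match PySem.List.pyGet? lines i with
    | none => []             -- IndexError; unreachable from chopBackwards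
    | some line =>
      if PySem.Str.isIn string line then chopA_pop lines (i + count) count []
      else chopA_loop lines string (i - 1) count
  else []
termination_by (i + count + 1).toNat
decreasing_by omega

def chopBackwards (lines : List String) (string : String) : List String :=
  chopA_loop lines string (-1) (lines.length : Int)

-- ===== PORT B =====
def chopBackwards_alt (lines : List String) (string : String) : List String :=
  let idx : Option Int :=
    (PySem.List.enumerate lines 0).foldl
      (fun acc p => if PySem.Str.isIn string p.2 then some p.1 else acc) none
  match idx with
  | none => []
  | some j => PySem.List.slice lines (some j) none   -- cut = lines[idx:]

-- ===== PRECONDITION & SPEC =====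
def Spec_chopBackwards (lines : List String) (string : String) (out : List String) : Prop := out = chopBackwards_alt lines string
instance (lines : List String) (string : String) (out : List String) : Decidable (Spec_chopBackwards lines string out) := by unfold Spec_chopBackwards; infer_instance

-- ===== CLAIM (what is proved, stated in full; the proofs are below) =====
def Claim_equal_chopBackwards : Prop := ∀ (lines : List String) (string : String), Dom_chopBackwards lines string → Spec_chopBackwards lines string (chopBackwards lines string)

-- ===== LEMMAS AND PROOFS =====

-- index of the last line containing `string` (reference for both ports)
def lastIdx (string : String) : List String → Option Nat
  | [] => none
  | x :: xs =>
      match lastIdx string xs with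
      | some j => some (j + 1)
      | none => if PySem.Str.isIn string x then some 0 else none

theorem lastIdx_append_singleton (string : String) (ys : List String) (x : String) :
    lastIdx string (ys ++ [x]) =
      if PySem.Str.isIn string x then some ys.length else lastIdx string ys := by
  induction ys with
  | nil =>
      by_cases hc : PySem.Chars.isIn string.toList x.toList = true <;>
        simp [lastIdx, hc]
  | cons y ys ih =>
      simp only [List.cons_append, lastIdx, ih]
      by_cases hc : PySem.Chars.isIn string.toList x.toList = true <;> simp [hc]

-- the pop loop collects exactly the suffix from index j
theorem chopA_pop_eq (string : String) : ∀ (n : Nat) (lines : List String) (j : Nat)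
    (cut : List String), lines.length = n →
    chopA_pop lines (j : Int) (lines.length : Int) cut = cut ++ lines.drop j := by
  intro n
  induction n with
  | zero =>
      intro lines j cut hn
      have : lines = [] := List.eq_nil_of_length_eq_zero hn
      subst this
      rw [chopA_pop]
      simp
  | succ n ih =>
      intro lines j cut hn
      rw [chopA_pop]
      by_cases hj : (j : Int) < (lines.length : Int)
      · have hjn : j < lines.length := by exact_mod_cast hj
        rw [dif_pos hj]
        simp only [PySem.List.pop?_natCast lines j hjn]
        have hlen : (lines.eraseIdx j).length = n := by
          rw [List.length_eraseIdx_of_lt hjn]; omega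
        have hc1 : ((lines.length : Int) - 1) = ((lines.eraseIdx j).length : Int) := by
          rw [hlen]; omega
        rw [hc1, ih (lines.eraseIdx j) j (cut ++ [lines[j]]) hlen]
        rw [List.eraseIdx_eq_take_drop_succ]
        have htk : (lines.take j).length = j := by simp; omega
        rw [List.drop_append, htk]
        simp only [Nat.sub_self, List.drop_zero]
        rw [List.drop_of_length_le (le_of_eq htk)]
        rw [List.drop_eq_getElem_cons hjn]
        simp
      · rw [dif_neg hj]
        have : lines.length ≤ j := by omega
        simp [List.drop_eq_nil_of_le this]

-- the backward scan realises "last match among the first k lines, then drop"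
theorem chopA_loop_eq (string : String) : ∀ (k : Nat) (lines : List String),
    k ≤ lines.length →
    chopA_loop lines string ((k : Int) - 1 - (lines.length : Int)) (lines.length : Int) =
      (match lastIdx string (lines.take k) with
       | none => []
       | some j => lines.drop j) := by
  intro k
  induction k with
  | zero =>
      intro lines _
      rw [chopA_loop, dif_neg (by push_cast; omega)]
      simp [lastIdx]
  | succ k ih =>
      intro lines hk
      have hkl : k < lines.length := by omega
      rw [chopA_loop, dif_pos (by push_cast; omega)]
      have hidx : ((k + 1 : Nat) : Int) - 1 - (lines.length : Int) =
          -(((lines.length - k : Nat)) : Int) := by push_cast; omega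
      have hget : PySem.List.pyGet? lines (((k + 1 : Nat) : Int) - 1 - (lines.length : Int)) =
          some lines[k] := by
        rw [hidx, PySem.List.pyGet?_neg_natCast lines (lines.length - k) (by omega) (by omega)]
        have h2 : lines.length - (lines.length - k) = k := by omega
        rw [h2, List.getElem?_eq_getElem hkl]
      simp only [hget]
      have htake : lines.take (k + 1) = lines.take k ++ [lines[k]] := by
        rw [List.take_add_one, List.getElem?_eq_getElem hkl]; rfl
      rw [htake, lastIdx_append_singleton]
      by_cases hc : PySem.Str.isIn string lines[k] = true
      · rw [if_pos hc, if_pos hc]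
        have hi : (((k + 1 : Nat) : Int) - 1 - (lines.length : Int) + (lines.length : Int)) =
            ((k : Nat) : Int) := by push_cast; omega
        rw [hi, chopA_pop_eq string lines.length lines k [] rfl]
        simp
      · rw [if_neg hc, if_neg hc]
        have hi : (((k + 1 : Nat) : Int) - 1 - (lines.length : Int) - 1) =
            ((k : Int) - 1 - (lines.length : Int)) := by push_cast; omega
        rw [hi, ih lines (by omega)]

-- the forward fold over enumerate computes lastIdx (shifted by the start)
theorem fold_enum_eq (string : String) : ∀ (xs : List String) (s : Int) (acc : Option Int),
    (PySem.List.enumerate xs s).foldl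
        (fun acc p => if PySem.Str.isIn string p.2 then some p.1 else acc) acc =
      (match lastIdx string xs with
       | some j => some (s + (j : Int))
       | none => acc) := by
  intro xs
  induction xs with
  | nil => intro s acc; simp [PySem.List.enumerate_nil, lastIdx]
  | cons x xs ih =>
      intro s acc
      rw [PySem.List.enumerate_cons, List.foldl_cons, ih]
      simp only [lastIdx]
      cases hx : lastIdx string xs with
      | some j => push_cast; ring_nf
      | none =>
          by_cases hc : PySem.Chars.isIn string.toList x.toList = true <;> simp [hc]

theorem alt_eq (lines : List String) (string : String) :
    chopBackwards_alt lines string =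
      (match lastIdx string lines with
       | none => []
       | some j => lines.drop j) := by
  unfold chopBackwards_alt
  rw [fold_enum_eq]
  cases h : lastIdx string lines with
  | none => simp
  | some j =>
      simp only [zero_add]
      rw [PySem.List.slice_from_natCast]

-- ===== VERDICT (by name: the statement is the Claim_ definition above) =====
theorem chopBackwards_spec : Claim_equal_chopBackwards := by
  intro lines string _
  unfold Spec_chopBackwards chopBackwards
  rw [alt_eq]
  have h := chopA_loop_eq string lines.length lines (le_refl _)
  have hi : ((lines.length : Int) - 1 - (lines.length : Int)) = (-1 : Int) := by omega
  rw [hi, List.take_length] at h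
  exact h
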